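-- pv_equiv track=rewrite | github.com/sallymoc/static-api | scripts/update_smart_contracts.py | index_to_base56
-- ===== SOURCE A (Python) =====
-- from typing import Any, Dict, List, Optional, Tuple
--
-- def index_to_base56(idx: int) -> str:
--     alphabet = "ABCDEFGHIJKLMNOP"
--     if idx <= 0:
--         return "A" * 56
--     chars: List[str] = []
--     n = idx
--     while n > 0 and len(chars) < 56:
--         chars.append(alphabet[n & 0xF])
--         n >>= 4
--     while len(chars) < 56:
--         chars.append("A")
--     return "".join(chars[:56])
-- ===== SOURCE B (Python) =====
-- def index_to_base56(idx: int) -> str: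
--     if idx <= 0:
--         return "A" * 56
--     table = str.maketrans("0123456789abcdef", "ABCDEFGHIJKLMNOP")
--     s = format(idx, "x")[::-1].translate(table)
--     return (s + "A" * 56)[:56]
-- ===== Notes on version B (the rewrite author's own statement) =====
-- stated objective: idiomatic
-- what changed: Replaces the manual nibble shift/mask loop and separate padding loop with a single pipeline: hex-format the integer, reverse to little-endian, translate hex digits to A-P, then pad/truncate to the fixed width by concatenation and slicing.
import Mathlib
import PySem

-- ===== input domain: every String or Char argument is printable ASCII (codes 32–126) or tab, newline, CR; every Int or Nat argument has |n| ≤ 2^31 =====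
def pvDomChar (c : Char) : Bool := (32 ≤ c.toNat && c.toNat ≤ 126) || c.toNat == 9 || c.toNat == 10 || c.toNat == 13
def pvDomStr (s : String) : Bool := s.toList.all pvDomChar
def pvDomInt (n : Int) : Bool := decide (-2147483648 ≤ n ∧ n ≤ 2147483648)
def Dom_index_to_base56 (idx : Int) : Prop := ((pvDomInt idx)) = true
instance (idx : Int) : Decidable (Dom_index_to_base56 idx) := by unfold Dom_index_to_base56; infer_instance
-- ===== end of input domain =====

-- B replaces A's manual nibble shift/mask loop and padding loop with a hex-format /
-- reverse / translate / pad pipeline (objective: idiomatic; same cost).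

-- ===== PORT A =====
def pvAlpha : List Char := "ABCDEFGHIJKLMNOP".toList

-- while n > 0 and len(chars) < 56: chars.append(alphabet[n & 0xF]); n >>= 4
-- (under the guard n > 0, `n & 0xF` = n mod 16 and `n >>= 4` = n // 16, both exact;
--  the index n mod 16 is always in range for the 16-char alphabet, so getD's default is never used)
def i2bLoopA (n : Int) (chars : List Char) : List Char :=
  if h : 0 < n ∧ chars.length < 56 then
    i2bLoopA (PySem.Int.floordiv n 16)
      (chars ++ [(PySem.List.pyGet? pvAlpha (PySem.Int.mod n 16)).getD 'A'])
  else chars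
termination_by n.toNat
decreasing_by
  rcases h with ⟨h1, _⟩
  rw [PySem.Int.floordiv_eq_ediv_of_pos (by omega)]
  omega

-- while len(chars) < 56: chars.append("A")
def i2bPadA (chars : List Char) : List Char :=
  if chars.length < 56 then i2bPadA (chars ++ ['A']) else chars
termination_by 56 - chars.length
decreasing_by simp; omega

def index_to_base56 (idx : Int) : String :=
  if idx ≤ 0 then String.mk (List.replicate 56 'A')
  else String.mk ((i2bPadA (i2bLoopA idx [])).take 56)

-- ===== PORT B =====
-- format(n, "x"): hex digits, most-significant first (n > 0 here)
def hexChar (d : Nat) : Char := "0123456789abcdef".toList.getD d '0'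

def hexDigits (n : Nat) : List Char :=
  if h : n < 16 then [hexChar n]
  else hexDigits (n / 16) ++ [hexChar (n % 16)]
termination_by n
decreasing_by omega

-- str.maketrans("0123456789abcdef", "ABCDEFGHIJKLMNOP") applied per character
def transHex (c : Char) : Char :=
  match c with
  | '0' => 'A' | '1' => 'B' | '2' => 'C' | '3' => 'D' | '4' => 'E' | '5' => 'F'
  | '6' => 'G' | '7' => 'H' | '8' => 'I' | '9' => 'J' | 'a' => 'K' | 'b' => 'L'
  | 'c' => 'M' | 'd' => 'N' | 'e' => 'O' | 'f' => 'P' | _ => c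

def index_to_base56_alt (idx : Int) : String :=
  if idx ≤ 0 then String.mk (List.replicate 56 'A')
  else
    let s := ((hexDigits idx.toNat).reverse.map transHex)
    -- (s + "A" * 56)[:56]
    String.mk ((s ++ List.replicate 56 'A').take 56)

-- ===== PRECONDITION & SPEC =====
def Spec_index_to_base56 (idx : Int) (out : String) : Prop := out = index_to_base56_alt idx
instance (idx : Int) (out : String) : Decidable (Spec_index_to_base56 idx out) := by unfold Spec_index_to_base56; infer_instance

-- ===== CLAIM (what is proved, stated in full; the proofs are below) =====
def Claim_equal_index_to_base56 : Prop := ∀ (idx : Int), Dom_index_to_base56 idx → Spec_index_to_base56 idx (index_to_base56 idx)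

-- ===== LEMMAS AND PROOFS =====

-- little-endian nibble list, the common value both loops produce
def nibsLE (n : Nat) : List Nat :=
  if n = 0 then [] else n % 16 :: nibsLE (n / 16)
termination_by n
decreasing_by omega

def alphaChar (d : Nat) : Char := (PySem.List.pyGet? pvAlpha (d : Int)).getD 'A'

lemma nibsLE_lt (n : Nat) : ∀ d ∈ nibsLE n, d < 16 := by
  induction n using Nat.strong_induction_on with
  | _ n ih =>
    rw [nibsLE]
    split
    · simp
    · intro d hd
      rcases List.mem_cons.mp hd with h | h
      · omega
      · exact ih (n / 16) (by omega) d h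

lemma nibsLE_len (k : Nat) : ∀ n, n < 16 ^ k → (nibsLE n).length ≤ k := by
  induction k with
  | zero => intro n h; interval_cases n; simp [nibsLE]
  | succ k ih =>
    intro n h
    rw [nibsLE]
    split
    · simp
    · simp only [List.length_cons]
      have : n / 16 < 16 ^ k := by
        rw [Nat.div_lt_iff_lt_mul (by norm_num)]
        calc n < 16 ^ (k + 1) := h
          _ = 16 ^ k * 16 := by ring
      have := ih (n / 16) this
      omega

lemma hexDigits_reverse (n : Nat) (hn : 0 < n) :
    (hexDigits n).reverse = (nibsLE n).map hexChar := by
  induction n using Nat.strong_induction_on with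
  | _ n ih =>
    rw [hexDigits, nibsLE]
    split
    · have : n % 16 = n := Nat.mod_eq_of_lt (by omega)
      simp [if_neg (by omega : ¬ n = 0), nibsLE, Nat.div_eq_of_lt (by omega : n < 16), this]
    · rw [if_neg (by omega : ¬ n = 0)]
      simp only [List.reverse_append, List.reverse_singleton, List.map_cons, List.singleton_append]
      congr 1
      exact ih (n / 16) (by omega) (by omega)

lemma trans_hexChar (d : Nat) (hd : d < 16) : transHex (hexChar d) = alphaChar d := by
  interval_cases d <;> rfl

lemma loopA_eq (n : Nat) : ∀ chars : List Char,
    chars.length + (nibsLE n).length ≤ 56 →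
    i2bLoopA (n : Int) chars = chars ++ (nibsLE n).map alphaChar := by
  induction n using Nat.strong_induction_on with
  | _ n ih =>
    intro chars h
    rw [i2bLoopA]
    by_cases hn : n = 0
    · subst hn
      rw [dif_neg (by simp)]
      simp [nibsLE]
    · rw [nibsLE, if_neg hn] at h ⊢
      simp only [List.length_cons] at h
      rw [dif_pos ⟨by omega, by omega⟩]
      rw [show PySem.Int.floordiv (n : Int) 16 = ((n / 16 : Nat) : Int) from
            PySem.Int.floordiv_natCast n 16,
          show PySem.Int.mod (n : Int) 16 = ((n % 16 : Nat) : Int) from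
            PySem.Int.mod_natCast n 16]
      rw [ih (n / 16) (by omega) _ (by simpa using by omega)]
      simp [alphaChar]

lemma padA_eq (chars : List Char) :
    i2bPadA chars = chars ++ List.replicate (56 - chars.length) 'A' := by
  fun_induction i2bPadA chars with
  | case1 chars h ih =>
    rw [ih]
    have : 56 - chars.length = (56 - (chars.length + 1)) + 1 := by omega
    simp only [List.length_append, List.length_singleton, List.append_assoc]
    rw [this, List.replicate_succ]
    rfl
  | case2 chars h =>
    have : 56 - chars.length = 0 := by omega
    simp [this]

-- ===== VERDICT (by name: the statement is the Claim_ definition above) =====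
theorem index_to_base56_spec : Claim_equal_index_to_base56 := by
  intro idx hdom
  unfold Spec_index_to_base56 index_to_base56 index_to_base56_alt
  by_cases hle : idx ≤ 0
  · simp [hle]
  · rw [if_neg hle, if_neg hle]
    have hpos : 0 < idx := by omega
    set n := idx.toNat with hn
    have hcast : (n : Int) = idx := Int.toNat_of_nonneg (by omega)
    have hbound : n < 16 ^ 8 := by
      have : idx ≤ 2147483648 := by
        have h2 : -2147483648 ≤ idx ∧ idx ≤ 2147483648 := by
          simpa [Dom_index_to_base56, pvDomInt] using hdom
        exact h2.2
      omega
    have hlen : (nibsLE n).length ≤ 56 :=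
      le_trans (nibsLE_len 8 n hbound) (by norm_num)
    have hA : i2bLoopA idx [] = (nibsLE n).map alphaChar := by
      rw [← hcast, loopA_eq n [] (by simpa using hlen)]
      simp
    have hmap : (hexDigits n).reverse.map transHex = (nibsLE n).map alphaChar := by
      rw [hexDigits_reverse n (by omega), List.map_map]
      exact List.map_congr_left (fun d hd => trans_hexChar d (nibsLE_lt n d hd))
    rw [hA, padA_eq]
    simp only [hmap, List.length_map]
    congr 1
    rw [List.take_append, List.take_append, List.take_of_length_le (by simpa using hlen),
        List.take_replicate, List.take_replicate, List.length_map,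
        Nat.min_self, Nat.min_eq_left (by omega)]
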